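-- pv_equiv track=rewrite | github.com/arieldd/aoc | day18/solution.py | count_air_pockets
-- ===== SOURCE A (Python) =====
-- def count_air_pockets(adj):
--     pockets = 0
--
--     free_pos = {}
--     coord_list = [item for sublist in adj.values() for item in sublist]
--
--     for [x,y,z] in coord_list:
--         coord = (x,y,z)
--         if coord not in free_pos:
--             free_pos[coord] = 0
--         free_pos[coord] += 1
--
--     for v in free_pos.values():
--         if v ==6:
--             pockets +=1
--
--     return pockets
-- ===== SOURCE B (Python) =====
-- def count_air_pockets(adj):
--     coords = sorted([x, y, z] for v in adj.values() for x, y, z in v)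
--     pockets = 0
--     run = 0
--     prev = None
--     for c in coords:
--         if c == prev:
--             run += 1
--         else:
--             if run == 6:
--                 pockets += 1
--             prev, run = c, 1
--     if run == 6:
--         pockets += 1
--     return pockets
-- ===== Notes on version B (the rewrite author's own statement) =====
-- stated objective: alternative
-- what changed: Replaces A's hand-rolled dict tally (count every coordinate in a hash map, then count values equal to 6) by sort-then-run-length: sort the flattened coordinate list once and count maximal runs of length exactly 6 in a single pass.
import Mathlib
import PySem

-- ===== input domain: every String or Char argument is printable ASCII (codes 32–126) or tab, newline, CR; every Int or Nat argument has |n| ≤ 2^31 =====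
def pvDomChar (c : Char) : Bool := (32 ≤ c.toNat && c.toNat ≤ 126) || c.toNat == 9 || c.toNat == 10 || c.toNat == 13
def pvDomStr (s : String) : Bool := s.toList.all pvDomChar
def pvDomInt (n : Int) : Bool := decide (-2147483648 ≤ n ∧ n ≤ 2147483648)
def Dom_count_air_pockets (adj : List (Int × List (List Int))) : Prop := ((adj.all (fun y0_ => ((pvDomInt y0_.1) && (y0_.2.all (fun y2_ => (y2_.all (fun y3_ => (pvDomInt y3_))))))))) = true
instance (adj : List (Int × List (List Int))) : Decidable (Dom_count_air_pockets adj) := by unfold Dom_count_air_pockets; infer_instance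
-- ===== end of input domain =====

-- B replaces A's hand-rolled dict tally (count each coordinate, then count values equal to 6)
-- by sort-then-run-length: sort the flattened coordinate list and count maximal runs of length
-- exactly 6 in one pass (objective: alternative decomposition, similar cost).

-- ===== PORT A =====
-- the body of A's first loop: `if coord not in free_pos: free_pos[coord] = 0; free_pos[coord] += 1`
def pvTallyStep (d : PySem.Dict (Int × Int × Int) Int) (coord : Int × Int × Int) :
    PySem.Dict (Int × Int × Int) Int :=
  let d' := if d.contains coord then d else d.insert coord 0
  d'.modify coord 0 (· + 1)

def count_air_pockets (adj : List (Int × List (List Int))) : Int :=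
  let pockets : Int := 0
  let coord_list : List (List Int) :=
    ((PySem.Dict.ofList adj).values).foldl (fun acc sublist => acc ++ sublist) []
  let free_pos : PySem.Dict (Int × Int × Int) Int :=
    coord_list.foldl (fun d item =>
      match item with
      | [x, y, z] => pvTallyStep d (x, y, z)
      | _ => d        -- Python raises ValueError unpacking `[x,y,z]` here; excluded by Pre_
      ) PySem.Dict.empty
  free_pos.values.foldl (fun p v => if v = 6 then p + 1 else p) pockets

-- ===== PORT B =====
-- the body of B's loop, state = (prev, run, pockets)
def pvRunStep (s : Option (List Int) × Int × Int) (c : List Int) :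
    Option (List Int) × Int × Int :=
  if some c = s.1 then (s.1, s.2.1 + 1, s.2.2)
  else (some c, 1, if s.2.1 = 6 then s.2.2 + 1 else s.2.2)

-- B's `[x, y, z]` rebuild inside the comprehension (Python raises ValueError on other shapes)
def pvUnpack (item : List Int) : List Int :=
  match item with
  | x :: y :: z :: [] => [x, y, z]
  | [] => item          -- on every non-triple shape Python raises ValueError; excluded by Pre_
  | _x :: [] => item
  | _x :: _y :: [] => item
  | _x :: _y :: _z :: _w :: _t => item

-- B's trailing `if run == 6: pockets += 1` flush
def pvFlush (s : Option (List Int) × Int × Int) : Int :=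
  if s.2.1 = 6 then s.2.2 + 1 else s.2.2

def count_air_pockets_alt (adj : List (Int × List (List Int))) : Int :=
  let coords : List (List Int) :=
    PySem.List.sorted
      ((((PySem.Dict.ofList adj).values).foldl (fun acc v => acc ++ v) []).map pvUnpack)
      (fun c => c) false
  pvFlush (coords.foldl pvRunStep (none, 0, 0))

-- ===== PRECONDITION & SPEC =====
-- Pre_ excludes exactly the inputs where A raises ValueError: some coordinate list in the
-- dict's values does not have exactly three entries, so `for [x,y,z] in coord_list` fails.
def Pre_count_air_pockets (adj : List (Int × List (List Int))) : Prop :=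
  ∀ c ∈ ((PySem.Dict.ofList adj).values).flatten, c.length = 3
instance (adj : List (Int × List (List Int))) : Decidable (Pre_count_air_pockets adj) := by
  unfold Pre_count_air_pockets; infer_instance

def pvWitness_count_air_pockets : (List (Int × List (List Int))) := [(1, [[0, 0, 0]])]

def Spec_count_air_pockets (adj : List (Int × List (List Int))) (out : Int) : Prop :=
  out = count_air_pockets_alt adj
instance (adj : List (Int × List (List Int))) (out : Int) :
    Decidable (Spec_count_air_pockets adj out) := by
  unfold Spec_count_air_pockets; infer_instance

-- ===== CLAIM (what is proved, stated in full; the proofs are below) =====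
def Claim_equal_count_air_pockets : Prop :=
  ∀ (adj : List (Int × List (List Int))), Dom_count_air_pockets adj →
    Pre_count_air_pockets adj → Spec_count_air_pockets adj (count_air_pockets adj)

-- ===== LEMMAS AND PROOFS =====

-- the common value both programs compute: number of distinct coordinates of zs whose
-- multiplicity in zs is exactly 6
def pvS (zs : List (List Int)) : Int :=
  ((PySem.Set.ofList zs).countP (fun k => ((zs.count k : Int)) == 6) : Int)

-- tuple(l) for a length-3 list, as A's loop builds it
def pvT (l : List Int) : Int × Int × Int := (l.getD 0 0, l.getD 1 0, l.getD 2 0)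

lemma pvT_inj {a b : List Int} (ha : a.length = 3) (hb : b.length = 3)
    (h : pvT a = pvT b) : a = b := by
  obtain ⟨x, y, z, rfl⟩ := List.length_eq_three.mp ha
  obtain ⟨x', y', z', rfl⟩ := List.length_eq_three.mp hb
  simp [pvT] at h
  simp [h.1, h.2.1, h.2.2]

lemma pvTallyStep_eq (d : PySem.Dict (Int × Int × Int) Int) (c : Int × Int × Int) :
    pvTallyStep d c = d.modify c 0 (· + 1) := by
  unfold pvTallyStep
  by_cases h : d.contains c = true
  · simp [h]
  · have hc : d.contains c = false := by simpa using h
    simp [PySem.Dict.modify, hc, PySem.Dict.getD_insert_self,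
      PySem.Dict.insert_insert_self, PySem.Dict.getD_of_not_contains d 0 hc]

lemma pvFold_eq_counter (xs : List (List Int)) (h3 : ∀ l ∈ xs, l.length = 3) :
    xs.foldl (fun d item =>
      match item with
      | [x, y, z] => pvTallyStep d (x, y, z)
      | _ => d) PySem.Dict.empty = PySem.Dict.counter (xs.map pvT) := by
  rw [PySem.Dict.counter_eq_foldl, List.foldl_map]
  refine PySem.List.foldl_congr_mem xs _ _ _ ?_
  intro acc l hl
  obtain ⟨x, y, z, rfl⟩ := List.length_eq_three.mp (h3 l hl)
  simp only [pvTallyStep_eq, pvT]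
  rfl

lemma pv_count_map (xs : List (List Int)) (l : List Int)
    (h3 : ∀ m ∈ xs, m.length = 3) (hl : l.length = 3) :
    (xs.map pvT).count (pvT l) = xs.count l := by
  induction xs with
  | nil => simp
  | cons m t ih =>
    have hm := h3 m (by simp)
    have ht : ∀ m' ∈ t, m'.length = 3 := fun m' h => h3 m' (by simp [h])
    simp only [List.map_cons, List.count_cons, ih ht]
    congr 1
    by_cases he : m = l
    · simp [he]
    · have : pvT m ≠ pvT l := fun hc => he (pvT_inj hm hl hc)
      simp [he, this]

lemma pv_setOfList_map (xs : List (List Int)) (h3 : ∀ m ∈ xs, m.length = 3) :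
    PySem.Set.ofList (xs.map pvT) = (PySem.Set.ofList xs).map pvT := by
  induction xs with
  | nil => simp [PySem.Set.ofList_nil]
  | cons m t ih =>
    have hm := h3 m (by simp)
    have ht : ∀ m' ∈ t, m'.length = 3 := fun m' h => h3 m' (by simp [h])
    simp only [List.map_cons, PySem.Set.ofList_cons, ih ht]
    congr 1
    -- discard commutes with an injective-on-members map
    simp only [PySem.Set.discard, List.filter_map]
    congr 1
    apply List.filter_congr
    intro k hk
    have hk3 : k.length = 3 := ht k ((PySem.Set.mem_ofList t k).mp hk)
    by_cases he : k = m
    · simp [he]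
    · have : pvT k ≠ pvT m := fun hc => he (pvT_inj hk3 hm hc)
      simp [he, this, Function.comp]

-- A computes pvS of the flattened coordinate list
lemma pvA_eq_S (xs : List (List Int)) (h3 : ∀ l ∈ xs, l.length = 3) :
    (xs.foldl (fun d item =>
      match item with
      | [x, y, z] => pvTallyStep d (x, y, z)
      | _ => d) PySem.Dict.empty).values.foldl
        (fun p v => if v = 6 then p + 1 else p) 0 = pvS xs := by
  rw [pvFold_eq_counter xs h3]
  rw [PySem.Dict.values_eq_map_keys _ (PySem.Dict.nodup_keys_counter _) 0,
    PySem.Dict.keys_counter, pv_setOfList_map xs h3]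
  have hfc := PySem.List.foldl_count_if (fun v : Int => v == 6)
    (((PySem.Set.ofList xs).map pvT).map
      (fun k => (PySem.Dict.counter (xs.map pvT)).getD k 0)) 0
  simp only [beq_iff_eq] at hfc
  rw [hfc, List.countP_map, List.countP_map, zero_add]
  unfold pvS
  congr 1
  apply List.countP_congr
  intro k hk
  have hk3 : k.length = 3 := h3 k ((PySem.Set.mem_ofList xs k).mp hk)
  simp only [Function.comp_apply, PySem.Dict.getD_counter, beq_iff_eq]
  rw [pv_count_map xs k h3 hk3]

lemma pvS_perm {xs ys : List (List Int)} (h : xs.Perm ys) : pvS xs = pvS ys := by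
  unfold pvS
  have hmem : ∀ a, a ∈ PySem.Set.ofList xs ↔ a ∈ PySem.Set.ofList ys := by
    intro a; simp [PySem.Set.mem_ofList, h.mem_iff]
  have hperm : (PySem.Set.ofList xs).Perm (PySem.Set.ofList ys) :=
    (List.perm_ext_iff_of_nodup (PySem.Set.nodup_ofList _) (PySem.Set.nodup_ofList _)).mpr hmem
  rw [List.countP_congr (fun k _ => by rw [h.count_eq]), hperm.countP_eq]

lemma pvS_cons (y : List Int) (t : List (List Int)) :
    pvS (y :: t) = (if (((y :: t).count y : Int)) = 6 then 1 else 0)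
      + pvS (t.filter (fun z => z ≠ y)) := by
  unfold pvS
  rw [PySem.Set.ofList_cons, List.countP_cons]
  have hmem : ∀ a, a ∈ (PySem.Set.ofList t).discard y ↔
      a ∈ PySem.Set.ofList (t.filter (fun z => z ≠ y)) := by
    intro a
    rw [PySem.Set.mem_discard, PySem.Set.mem_ofList, PySem.Set.mem_ofList, List.mem_filter]
    simp
  have hperm : ((PySem.Set.ofList t).discard y).Perm
      (PySem.Set.ofList (t.filter (fun z => z ≠ y))) :=
    (List.perm_ext_iff_of_nodup (PySem.Set.nodup_discard _ _ (PySem.Set.nodup_ofList t))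
      (PySem.Set.nodup_ofList _)).mpr hmem
  have hcong : List.countP (fun k => (((y :: t).count k : Int)) == 6)
        ((PySem.Set.ofList t).discard y)
      = List.countP (fun k => (((t.filter (fun z => z ≠ y)).count k : Int)) == 6)
        ((PySem.Set.ofList t).discard y) := by
    apply List.countP_congr
    intro k hk
    have hk' := (PySem.Set.mem_discard (PySem.Set.ofList t) y k).mp hk
    have h1 : (y :: t).count k = t.count k := by
      simp [(Ne.symm hk'.2 : ¬ y = k)]
    have h2 : (t.filter (fun z => z ≠ y)).count k = t.count k :=
      List.count_filter (by simp [hk'.2])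
    rw [h1, h2]
  rw [hcong, hperm.countP_eq]
  push_cast
  simp only [beq_iff_eq]
  ring

lemma pvUnpack_id (l : List Int) : pvUnpack l = l := by
  rcases l with _ | ⟨a, _ | ⟨b, _ | ⟨c, _ | ⟨d, t⟩⟩⟩⟩ <;> rfl

-- the run-length loop invariant
lemma pvRun_invariant (ys : List (List Int)) :
    ∀ (c : List Int) (run p : Int), 1 ≤ run → ys.Pairwise (· ≤ ·) → (∀ y ∈ ys, c ≤ y) →
    pvFlush (ys.foldl pvRunStep (some c, run, p)) =
      p + (if run + (ys.count c : Int) = 6 then 1 else 0) + pvS (ys.filter (fun z => z ≠ c)) := by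
  induction ys with
  | nil =>
    intro c run p hrun hpw hle
    simp only [List.foldl_nil, List.count_nil, List.filter_nil]
    simp only [pvFlush, pvS, PySem.Set.ofList_nil, List.countP_nil,
      add_zero, CharP.cast_eq_zero]
    split_ifs <;> ring
  | cons y t ih =>
    intro c run p hrun hpw hle
    have hpt := List.pairwise_cons.mp hpw
    rw [List.foldl_cons]
    by_cases hyc : y = c
    · subst hyc
      have hstep : pvRunStep (some y, run, p) y = (some y, run + 1, p) := by
        simp [pvRunStep]
      have hfil : (y :: t).filter (fun z => z ≠ y) = t.filter (fun z => z ≠ y) := by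
        simp
      have hcnt : (if run + (((y :: t).count y : Int)) = 6 then (1 : Int) else 0)
          = (if run + 1 + ((t.count y : Int)) = 6 then (1 : Int) else 0) := by
        simp only [List.count_cons_self]
        push_cast
        split_ifs <;> omega
      rw [hstep, hfil, hcnt]
      exact ih y (run + 1) p (by omega) hpt.2 hpt.1
    · have hstep : pvRunStep (some c, run, p) y = (some y, 1, if run = 6 then p + 1 else p) := by
        simp [pvRunStep, hyc]
      have hcy : c ≤ y := hle y (List.mem_cons_self)
      have hmemc : c ∉ y :: t := by
        intro hm
        rcases List.mem_cons.mp hm with h | h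
        · exact hyc h.symm
        · exact hyc (le_antisymm (hpt.1 c h) hcy)
      have hcnt0 : (y :: t).count c = 0 := List.count_eq_zero.mpr hmemc
      have hfil : (y :: t).filter (fun z => z ≠ c) = y :: t :=
        List.filter_eq_self.mpr (fun z hz => by
          simp only [decide_eq_true_eq, ne_eq]
          exact fun h => hmemc (h ▸ hz))
      rw [hstep, ih y 1 _ (le_refl 1) hpt.2 hpt.1, hcnt0, hfil, pvS_cons y t]
      have e1 : (if (1 : Int) + ((t.count y : Int)) = 6 then (1 : Int) else 0)
          = (if (((y :: t).count y : Int)) = 6 then (1 : Int) else 0) := by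
        simp only [List.count_cons_self]
        push_cast
        split_ifs <;> omega
      rw [e1]
      push_cast
      simp only [add_zero]
      split_ifs <;> ring

lemma pvB_eq_S (xs : List (List Int)) :
    pvFlush ((PySem.List.sorted xs (fun c => c) false).foldl pvRunStep (none, 0, 0)) = pvS xs := by
  have hperm := PySem.List.sorted_perm xs (fun c => c) false
  rw [← pvS_perm hperm]
  have einst : (fun (a b : List Int) => a.decidableLT b)
      = (LinearOrder.toDecidableLT : DecidableLT (List Int)) := Subsingleton.elim _ _
  have hpw : List.Pairwise (fun a b : List Int => a ≤ b)
      (PySem.List.sorted xs (fun c => c) false) := by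
    rw [show (PySem.List.sorted xs (fun c : List Int => c) false)
        = @PySem.List.sorted (List Int) (List Int) List.instLinearOrder.toLT
            LinearOrder.toDecidableLT xs (fun c => c) false by rw [← einst]]
    exact PySem.List.sorted_pairwise xs (fun c => c)
  cases hys : PySem.List.sorted xs (fun c => c) false with
  | nil => norm_num [pvFlush, pvS, PySem.Set.ofList_nil]
  | cons c rest =>
    rw [hys] at hpw
    have hpt := List.pairwise_cons.mp hpw
    rw [List.foldl_cons]
    have hstep : pvRunStep (none, 0, 0) c = (some c, 1, 0) := by
      simp [pvRunStep]
    rw [hstep, pvRun_invariant rest c 1 0 (le_refl 1) hpt.2 hpt.1, pvS_cons c rest]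
    have e1 : (if (1 : Int) + ((rest.count c : Int)) = 6 then (1 : Int) else 0)
        = (if (((c :: rest).count c : Int)) = 6 then (1 : Int) else 0) := by
      simp only [List.count_cons_self]
      push_cast
      split_ifs <;> omega
    rw [e1]
    ring

-- ===== VERDICT (by name: the statement is the Claim_ definition above) =====
theorem count_air_pockets_spec : Claim_equal_count_air_pockets := by
  intro adj _ hpre
  unfold Spec_count_air_pockets count_air_pockets count_air_pockets_alt
  simp only []
  rw [PySem.List.foldl_append_eq_flatMap (fun v => v) _ []]
  simp only [List.nil_append]
  have h3 : ∀ l ∈ ((PySem.Dict.ofList adj).values).flatMap (fun v => v), l.length = 3 := by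
    intro l hl
    exact hpre l (by simpa [List.flatMap_id'] using hl)
  rw [List.map_congr_left (fun l _ => pvUnpack_id l)]
  simp only [List.map_id']
  rw [pvA_eq_S _ h3]
  exact (pvB_eq_S _).symm
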